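-- pv_equiv track=rewrite | github.com/RAG4SE/RAGalyze | ragalyze/agent.py | _parse_cpp_chained_expression
-- ===== SOURCE A (Python) =====
-- from typing import Any, Dict, Iterable, List, Literal, Optional, Set, Tuple, Union
--
-- def _parse_cpp_chained_expression(expression: str) -> List[Dict[str, Any]]:
--     """
--     Parse C++ chained expressions like A::B::c.f()->m.g().
--
--     This handles the pattern where:
--     - A, B are namespaces/classes (separated by ::)
--     - c is a member of class B
--     - f is a function in the class c belongs to
--     - m is a member of the class type returned by f
--     - g is a member function in m's class
--
--     Args:
--         expression: The C++ chained expression to parse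
--
--     Returns:
--         List of components with proper C++ namespace and member access handling
--     """
--     components = []
--     chunks = expression.strip().split("::")
--     for namespace_or_class in chunks[:-1]:
--         components.append(
--             {
--                 "name": namespace_or_class.strip(),
--                 "type": "namespace_or_class",
--             }
--         )
--
--     front_pointer = 0
--     for i in range(len(chunks[-1])):
--         if chunks[-1][i] == ".":
--             _name = chunks[-1][front_pointer:i].strip()
--             _type = "member_access" if "(" not in _name else "function_call"
--             if _type == "function_call":
--                 _name = _name.split("(")[0].strip()
--             components.append(
--                 {
--                     "name": _name,
--                     "type": _type,
--                 }
--             )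
--             front_pointer = i + 1
--         elif (
--             chunks[-1][i] == "-"
--             and i + 1 < len(chunks[-1])
--             and chunks[-1][i + 1] == ">"
--         ):
--             _name = chunks[-1][front_pointer:i].strip()
--             _type = "member_access" if "(" not in _name else "function_call"
--             if _type == "function_call":
--                 _name = _name.split("(")[0].strip()
--             components.append(
--                 {
--                     "name": _name,
--                     "type": _type,
--                 }
--             )
--             front_pointer = i + 2
--
--     _name = chunks[-1][front_pointer:].strip()
--     _type = "member_access" if "(" not in _name else "function_call"
--     if _type == "function_call":
--         _name = _name.split("(")[0].strip()
--     components.append(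
--         {
--             "name": _name,
--             "type": _type,
--         }
--     )
--     return components
-- ===== SOURCE B (Python) =====
-- from typing import Any, Dict, List
--
--
-- def _parse_cpp_chained_expression(expression: str) -> List[Dict[str, Any]]:
--     """Parse C++ chained expressions like A::B::c.f()->m.g().
--
--     Tokenizes the last ``::`` chunk in one shot (rewrite ``->`` to ``.`` and
--     split on ``.``), then classifies every segment with one uniform rule.
--     """
--     chunks = expression.strip().split("::")
--     components: List[Dict[str, Any]] = [
--         {"name": chunk.strip(), "type": "namespace_or_class"} for chunk in chunks[:-1]
--     ]
--     for segment in chunks[-1].replace("->", ".").split("."):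
--         if "(" in segment:
--             components.append(
--                 {"name": segment.split("(")[0].strip(), "type": "function_call"}
--             )
--         else:
--             components.append({"name": segment.strip(), "type": "member_access"})
--     return components
-- ===== Notes on version B (the rewrite author's own statement) =====
-- stated objective: simpler
-- what changed: Replaces the moving front_pointer character scan with lookahead and its three duplicated extract-and-classify blocks by one-shot tokenization of the last chunk (rewrite '->' to '.', split on '.') followed by a single uniform classification pass over the segments.
import Mathlib
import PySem

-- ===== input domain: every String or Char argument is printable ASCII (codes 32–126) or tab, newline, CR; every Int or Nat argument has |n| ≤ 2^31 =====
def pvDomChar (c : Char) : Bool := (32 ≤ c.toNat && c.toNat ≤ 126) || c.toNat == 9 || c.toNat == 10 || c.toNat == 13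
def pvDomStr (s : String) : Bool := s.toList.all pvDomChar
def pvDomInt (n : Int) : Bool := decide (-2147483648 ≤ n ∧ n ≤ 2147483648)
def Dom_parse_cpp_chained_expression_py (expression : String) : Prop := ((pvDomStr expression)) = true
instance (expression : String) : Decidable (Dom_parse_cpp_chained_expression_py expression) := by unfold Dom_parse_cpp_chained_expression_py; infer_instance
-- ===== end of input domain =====

-- B replaces A's moving front_pointer character scan (three duplicated extract blocks)
-- by one-shot tokenization (rewrite "->" to ".", split on ".") plus one uniform
-- classification pass; same return value, similar cost (objective: simpler).


-- ===== PORT A =====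
-- the repeated extract-and-classify block of A: _name = seg.strip();
-- _type = "member_access" if "(" not in _name else "function_call"; strip the "(..." tail when a call
def pvClassifyA (seg : List Char) : List (String × String) :=
  let n := PySem.Chars.strip seg
  if PySem.Chars.isIn ['('] n then
    [("name", String.ofList (PySem.Chars.strip ((PySem.Chars.splitOn n ['(']).headD []))),
     ("type", "function_call")]
  else
    [("name", String.ofList n), ("type", "member_access")]

-- A's `for i in range(len(chunks[-1]))` loop as the obvious structural recursion over the
-- remaining characters, carrying the index i, front_pointer fp and the components list;
-- `i + 1 < len(chunk) and chunk[i+1] == '>'` is exactly `pyGet? chunk (i+1) = some '>'`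
def pvGoA (chunk : List Char) : List Char → Nat → Nat → List (List (String × String)) → List (List (String × String))
  | [], fp, _, comps =>
      comps ++ [pvClassifyA (PySem.Chars.slice chunk (some (fp : Int)) none)]
  | c :: r, fp, i, comps =>
      if c = '.' then
        pvGoA chunk r (i + 1) (i + 1)
          (comps ++ [pvClassifyA (PySem.Chars.slice chunk (some (fp : Int)) (some (i : Int)))])
      else if c = '-' ∧ PySem.List.pyGet? chunk ((i : Int) + 1) = some '>' then
        pvGoA chunk r (i + 2) (i + 1)
          (comps ++ [pvClassifyA (PySem.Chars.slice chunk (some (fp : Int)) (some (i : Int)))])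
      else
        pvGoA chunk r fp (i + 1) comps

def parse_cpp_chained_expression_py (expression : String) : List (List (String × String)) :=
  let chunks := PySem.Chars.splitOn (PySem.Chars.strip expression.toList) [':', ':']
  let nsComps := (PySem.List.slice chunks none (some (-1))).foldl
    (fun acc c => acc ++ [[("name", String.ofList (PySem.Chars.strip c)), ("type", "namespace_or_class")]]) []
  let last := (PySem.List.pyGet? chunks (-1)).getD []   -- chunks[-1]; split never returns [], so exact
  pvGoA last last 0 0 nsComps

-- ===== PORT B =====
-- B's uniform per-segment classification: function_call iff "(" occurs in the raw segment
def pvClassifyB (seg : List Char) : List (String × String) :=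
  if PySem.Chars.isIn ['('] seg then
    [("name", String.ofList (PySem.Chars.strip ((PySem.Chars.splitOn seg ['(']).headD []))),
     ("type", "function_call")]
  else
    [("name", String.ofList (PySem.Chars.strip seg)), ("type", "member_access")]

def parse_cpp_chained_expression_py_alt (expression : String) : List (List (String × String)) :=
  let chunks := PySem.Chars.splitOn (PySem.Chars.strip expression.toList) [':', ':']
  let nsComps := (PySem.List.slice chunks none (some (-1))).map
    (fun c => [("name", String.ofList (PySem.Chars.strip c)), ("type", "namespace_or_class")])
  let last := (PySem.List.pyGet? chunks (-1)).getD []   -- chunks[-1]; split never returns [], so exact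
  nsComps ++ (PySem.Chars.splitOn (PySem.Chars.replace last ['-', '>'] ['.']) ['.']).map pvClassifyB

-- ===== PRECONDITION & SPEC =====
def Spec_parse_cpp_chained_expression_py (expression : String) (out : List (List (String × String))) : Prop := out = parse_cpp_chained_expression_py_alt expression
instance (expression : String) (out : List (List (String × String))) : Decidable (Spec_parse_cpp_chained_expression_py expression out) := by unfold Spec_parse_cpp_chained_expression_py; infer_instance

-- ===== CLAIM (what is proved, stated in full; the proofs are below) =====
def Claim_equal_parse_cpp_chained_expression_py : Prop := ∀ (expression : String), Dom_parse_cpp_chained_expression_py expression → Spec_parse_cpp_chained_expression_py expression (parse_cpp_chained_expression_py expression)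

-- ===== LEMMAS AND PROOFS =====

-- prepend a prefix onto the first piece of a piece list
def pvGlue (p : List Char) : List (List Char) → List (List Char)
  | [] => [p]
  | h :: t => (p ++ h) :: t

-- the common tokenization of the last chunk: cut at '.' and at "->"
def pvTok : List Char → List (List Char)
  | [] => [[]]
  | c :: r =>
    if c = '.' then [] :: pvTok r
    else if c = '-' ∧ r.head? = some '>' then [] :: pvTok r.tail
    else pvGlue [c] (pvTok r)
  termination_by s => s.length
  decreasing_by all_goals simp [List.length_tail]

-- recursive views of Chars.replace s "->" "." and Chars.splitOn s [d]
def pvRep : List Char → List Char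
  | [] => []
  | c :: t =>
    if c = '-' ∧ t.head? = some '>' then '.' :: pvRep t.tail
    else c :: pvRep t
  termination_by s => s.length
  decreasing_by all_goals simp [List.length_tail]

def pvSpD (d : Char) : List Char → List (List Char)
  | [] => [[]]
  | c :: r => if c = d then [] :: pvSpD d r else pvGlue [c] (pvSpD d r)

theorem pvGlue_glue (p q : List Char) (ts : List (List Char)) :
    pvGlue p (pvGlue q ts) = pvGlue (p ++ q) ts := by
  cases ts <;> simp [pvGlue]

theorem pvSpD_ne_nil (d : Char) (s : List Char) : pvSpD d s ≠ [] := by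
  cases s with
  | nil => simp [pvSpD]
  | cons c r =>
    simp only [pvSpD]
    split
    · simp
    · cases h : pvSpD d r <;> simp [pvGlue]

theorem pvTok_ne_nil (s : List Char) : pvTok s ≠ [] := by
  cases s with
  | nil => simp [pvTok]
  | cons c r =>
    rw [pvTok]
    split
    · simp
    · split
      · simp
      · cases h : pvTok r <;> simp [pvGlue]

theorem pvGlue_nil (ts : List (List Char)) (h : ts ≠ []) : pvGlue [] ts = ts := by
  cases ts with
  | nil => exact absurd rfl h
  | cons a t => simp [pvGlue]

theorem pvSpD_headD (d : Char) (s : List Char) :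
    (pvSpD d s).headD [] = s.takeWhile (fun c => c ≠ d) := by
  induction s with
  | nil => simp [pvSpD]
  | cons c r ih =>
    by_cases h : c = d
    · simp [pvSpD, h]
    · cases hsp : pvSpD d r with
      | nil => exact absurd hsp (pvSpD_ne_nil d r)
      | cons a t =>
        rw [hsp] at ih
        simp only [pvSpD, if_neg h, hsp, pvGlue, List.takeWhile_cons]
        simp only [List.headD_cons] at ih
        simp [h, ih]

-- Chars.splitOn by a single character is pvSpD
theorem pvSplitOn_go (d : Char) : ∀ (fuel : Nat) (l cur : List Char) (acc : List (List Char)),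
    l.length ≤ fuel →
    PySem.Chars.splitOn.go [d] fuel l cur acc = acc.reverse ++ pvGlue cur.reverse (pvSpD d l) := by
  intro fuel
  induction fuel with
  | zero =>
    intro l cur acc h
    have : l = [] := List.eq_nil_of_length_eq_zero (Nat.le_zero.mp h)
    subst this
    simp [PySem.Chars.splitOn.go, pvSpD, pvGlue]
  | succ n ih =>
    intro l cur acc h
    cases l with
    | nil => simp [PySem.Chars.splitOn.go, pvSpD, pvGlue]
    | cons c rest =>
      simp only [PySem.Chars.splitOn.go]
      by_cases hc : c = d
      · have hpre : [d].isPrefixOf (c :: rest) = true := by simp [List.isPrefixOf, hc]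
        rw [if_pos hpre]
        have hd : List.drop [d].length (c :: rest) = rest := rfl
        rw [hd, ih rest [] (cur.reverse :: acc) (by simpa using Nat.le_of_succ_le_succ h)]
        simp only [List.reverse_nil]
        rw [pvGlue_nil _ (pvSpD_ne_nil d rest)]
        simp [pvSpD, hc, pvGlue]
      · have hpre : ¬ ([d].isPrefixOf (c :: rest) = true) := by
          simp [List.isPrefixOf]; exact fun hdc => absurd hdc.symm hc
        rw [if_neg hpre]
        rw [ih rest (c :: cur) acc (by simpa using Nat.le_of_succ_le_succ h)]
        simp [pvSpD, hc, pvGlue_glue]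

theorem pvSplitOn_single (d : Char) (s : List Char) :
    PySem.Chars.splitOn s [d] = pvSpD d s := by
  rw [PySem.Chars.splitOn, pvSplitOn_go d (s.length + 1) s [] [] (Nat.le_succ _)]
  simp [pvGlue_nil _ (pvSpD_ne_nil d s)]

-- Chars.replace by "->" → "." is pvRep
theorem pvArrowPrefix (c : Char) (t : List Char) :
    ['-', '>'].isPrefixOf (c :: t) = true ↔ (c = '-' ∧ t.head? = some '>') := by
  cases t with
  | nil => simp [List.isPrefixOf]
  | cons b r =>
    simp only [List.isPrefixOf, List.head?]
    constructor
    · intro h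
      simp only [Bool.and_eq_true, beq_iff_eq] at h
      exact ⟨h.1.symm, by simp [h.2.1.symm]⟩
    · rintro ⟨h1, h2⟩
      simp only [Option.some.injEq] at h2
      simp [h1, h2]

theorem pvReplace_go : ∀ (fuel : Nat) (l acc : List Char),
    l.length ≤ fuel →
    PySem.Chars.replace.go ['-', '>'] ['.'] fuel l acc = acc.reverse ++ pvRep l := by
  intro fuel
  induction fuel with
  | zero =>
    intro l acc h
    have : l = [] := List.eq_nil_of_length_eq_zero (Nat.le_zero.mp h)
    subst this
    simp [PySem.Chars.replace.go, pvRep]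
  | succ n ih =>
    intro l acc h
    cases l with
    | nil => simp [PySem.Chars.replace.go, pvRep]
    | cons c t =>
      simp only [PySem.Chars.replace.go]
      by_cases hp : c = '-' ∧ t.head? = some '>'
      · rw [if_pos ((pvArrowPrefix c t).mpr hp)]
        have hdrop : List.drop ['-', '>'].length (c :: t) = t.tail := by cases t <;> simp
        have hrev : (['.'] : List Char).reverse ++ acc = '.' :: acc := rfl
        rw [hdrop, hrev]
        rw [ih t.tail ('.' :: acc) (by cases t <;> simp at h ⊢ <;> omega)]
        rw [pvRep, if_pos hp]
        simp
      · rw [if_neg (fun hh => hp ((pvArrowPrefix c t).mp hh))]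
        rw [ih t (c :: acc) (by simpa using Nat.le_of_succ_le_succ h)]
        rw [pvRep, if_neg hp]
        simp

theorem pvReplace_arrow (s : List Char) :
    PySem.Chars.replace s ['-', '>'] ['.'] = pvRep s := by
  rw [PySem.Chars.replace, if_neg (by simp)]
  exact pvReplace_go s.length s [] le_rfl

-- splitting the '->'-rewritten chunk on '.' is exactly the two-delimiter tokenization
theorem pvSpD_rep (s : List Char) : pvSpD '.' (pvRep s) = pvTok s := by
  induction hn : s.length using Nat.strong_induction_on generalizing s with
  | _ n ih =>
    cases s with
    | nil => simp [pvRep, pvTok, pvSpD]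
    | cons c t =>
      subst hn
      by_cases hp : c = '-' ∧ t.head? = some '>'
      · rw [pvRep, if_pos hp, pvTok, if_neg (by simp [hp.1]), if_pos hp]
        rw [pvSpD, if_pos rfl]
        congr 1
        exact ih t.tail.length (by cases t <;> simp_all) t.tail rfl
      · rw [pvRep, if_neg hp, pvTok, pvSpD]
        by_cases hc : c = '.'
        · rw [if_pos hc, if_pos hc]
          congr 1
          exact ih t.length (by simp) t rfl
        · rw [if_neg hc, if_neg hc, if_neg hp]
          congr 1
          exact ih t.length (by simp) t rfl

-- ===== classification agreement =====
theorem pvMem_dropWhile (p : Char → Bool) (c : Char) (hc : p c = false) :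
    ∀ s : List Char, c ∈ List.dropWhile p s ↔ c ∈ s := by
  intro s
  induction s with
  | nil => simp
  | cons a t ih =>
    by_cases h : p a
    · rw [List.dropWhile_cons_of_pos h, ih]
      constructor
      · exact fun hm => List.mem_cons_of_mem a hm
      · intro hm
        rcases List.mem_cons.mp hm with h1 | h1
        · subst h1; rw [hc] at h; exact absurd h (by simp)
        · exact h1
    · rw [List.dropWhile_cons_of_neg h]

theorem pvMem_lstrip (c : Char) (hc : PySem.Chars.isspace c = false) (s : List Char) :
    c ∈ PySem.Chars.lstrip s ↔ c ∈ s := by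
  rw [PySem.Chars.lstrip]; exact pvMem_dropWhile _ c hc s

theorem pvMem_rstrip (c : Char) (hc : PySem.Chars.isspace c = false) (s : List Char) :
    c ∈ PySem.Chars.rstrip s ↔ c ∈ s := by
  rw [PySem.Chars.rstrip]
  rw [List.mem_reverse, pvMem_dropWhile _ c hc, List.mem_reverse]

theorem pvMem_strip (c : Char) (hc : PySem.Chars.isspace c = false) (s : List Char) :
    c ∈ PySem.Chars.strip s ↔ c ∈ s := by
  rw [PySem.Chars.strip, pvMem_rstrip c hc, pvMem_lstrip c hc]

theorem pvIsIn_paren (s : List Char) : PySem.Chars.isIn ['('] s = true ↔ '(' ∈ s := by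
  rw [PySem.Chars.isIn_iff_infix]
  constructor
  · intro h; exact h.mem (by simp)
  · intro h
    rcases List.append_of_mem h with ⟨u, v, rfl⟩
    exact ⟨u, v, by simp⟩

theorem pvIsIn_paren_strip (s : List Char) :
    PySem.Chars.isIn ['('] (PySem.Chars.strip s) = PySem.Chars.isIn ['('] s := by
  by_cases h : '(' ∈ s
  · rw [(pvIsIn_paren _).mpr ((pvMem_strip '(' (by decide) s).mpr h), (pvIsIn_paren _).mpr h]
  · have h1 : PySem.Chars.isIn ['('] s ≠ true := fun hh => h ((pvIsIn_paren s).mp hh)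
    have h2 : PySem.Chars.isIn ['('] (PySem.Chars.strip s) ≠ true := fun hh =>
      h ((pvMem_strip '(' (by decide) s).mp ((pvIsIn_paren _).mp hh))
    simp only [Bool.not_eq_true] at h1 h2
    rw [h1, h2]

theorem pvTakeWhile_prefix_mem (d : Char) :
    ∀ (v u : List Char), v <+: u → d ∈ v →
      u.takeWhile (fun c => c ≠ d) = v.takeWhile (fun c => c ≠ d) := by
  intro v
  induction v with
  | nil => intro u _ hm; simp at hm
  | cons a v' ih =>
    intro u hpre hm
    rcases hpre with ⟨w, rfl⟩
    by_cases h : a = d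
    · subst h; simp
    · have hm' : d ∈ v' := by
        rcases List.mem_cons.mp hm with h1 | h1
        · exact absurd h1.symm h
        · exact h1
      simp only [List.cons_append, List.takeWhile_cons]
      rw [if_pos (by simp [h]), if_pos (by simp [h])]
      rw [ih (v' ++ w) ⟨w, rfl⟩ hm']

theorem pvRstrip_prefix (u : List Char) : PySem.Chars.rstrip u <+: u := by
  rw [PySem.Chars.rstrip]
  rcases List.dropWhile_suffix (l := u.reverse) PySem.Chars.isspace with ⟨w, hw⟩
  exact ⟨w.reverse, by rw [← List.reverse_append, hw, List.reverse_reverse]⟩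

theorem pvLstrip_decomp (s : List Char) :
    s = s.takeWhile PySem.Chars.isspace ++ PySem.Chars.lstrip s := by
  rw [PySem.Chars.lstrip, List.takeWhile_append_dropWhile]

-- key name-extraction fact: with '(' in seg, stripping before or after cutting at '(' agree
theorem pvCut_strip (seg : List Char) (h : '(' ∈ seg) :
    PySem.Chars.strip ((PySem.Chars.strip seg).takeWhile (fun c => c ≠ '(')) =
    PySem.Chars.strip (seg.takeWhile (fun c => c ≠ '(')) := by
  have hmem : '(' ∈ PySem.Chars.strip seg := (pvMem_strip '(' (by decide) seg).mpr h
  have h1 : (PySem.Chars.lstrip seg).takeWhile (fun c => c ≠ '(') =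
      (PySem.Chars.strip seg).takeWhile (fun c => c ≠ '(') :=
    pvTakeWhile_prefix_mem '(' (PySem.Chars.strip seg) (PySem.Chars.lstrip seg)
      (pvRstrip_prefix _) hmem
  have h2 : seg.takeWhile (fun c => c ≠ '(') =
      seg.takeWhile PySem.Chars.isspace ++ (PySem.Chars.lstrip seg).takeWhile (fun c => c ≠ '(') := by
    conv_lhs => rw [pvLstrip_decomp seg]
    rw [List.takeWhile_append_of_pos]
    intro a ha
    have hsp := List.mem_takeWhile_imp ha
    simp only [decide_eq_true_eq]
    intro hne
    subst hne
    exact absurd hsp (by decide)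
  rw [← h1, h2, PySem.Chars.strip, PySem.Chars.strip]
  congr 1
  conv_rhs => rw [PySem.Chars.lstrip]
  rw [List.dropWhile_append, if_pos (by
    simp only [List.isEmpty_iff]
    exact List.dropWhile_eq_nil_iff.mpr (fun x hx => List.mem_takeWhile_imp hx))]
  simp [PySem.Chars.lstrip]

theorem pvClassify_eq : pvClassifyA = pvClassifyB := by
  funext seg
  rw [pvClassifyA, pvClassifyB]
  simp only [pvIsIn_paren_strip]
  by_cases hin : PySem.Chars.isIn ['('] seg = true
  · rw [if_pos hin, if_pos hin]
    have h := (pvIsIn_paren seg).mp hin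
    rw [pvSplitOn_single, pvSplitOn_single, pvSpD_headD, pvSpD_headD]
    rw [pvCut_strip seg h]
  · rw [if_neg hin, if_neg hin]

-- ===== A's scan equals the tokenization =====
theorem pvGoA_nil (chunk : List Char) (fp i : Nat) (comps : List (List (String × String)))
    (hdrop : chunk.drop i = []) (hfp : fp ≤ i) :
    pvGoA chunk [] fp i comps =
      comps ++ (pvGlue ((chunk.drop fp).take (i - fp)) (pvTok [])).map pvClassifyA := by
  rw [pvGoA, pvTok]
  have hlen : chunk.length ≤ i := by
    have := List.drop_eq_nil_iff.mp hdrop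
    omega
  have hS : (chunk.drop fp).take (i - fp) = chunk.drop fp :=
    List.take_of_length_le (by simp; omega)
  rw [hS]
  simp [pvGlue, PySem.Chars.slice_eq_listSlice, PySem.List.slice_from_natCast]

theorem pvGoA_eq (chunk : List Char) : ∀ (n : Nat) (rest : List Char) (fp i : Nat)
    (comps : List (List (String × String))),
    rest.length ≤ n → chunk.drop i = rest → fp ≤ i →
    pvGoA chunk rest fp i comps =
      comps ++ (pvGlue ((chunk.drop fp).take (i - fp)) (pvTok rest)).map pvClassifyA := by
  intro n
  induction n with
  | zero =>
    intro rest fp i comps hn hdrop hfp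
    have : rest = [] := List.eq_nil_of_length_eq_zero (Nat.le_zero.mp hn)
    subst this
    exact pvGoA_nil chunk fp i comps hdrop hfp
  | succ n ih =>
    intro rest fp i comps hn hdrop hfp
    cases rest with
    | nil => exact pvGoA_nil chunk fp i comps hdrop hfp
    | cons c r =>
      have hdr : chunk.drop (i + 1) = r := by
        rw [← List.drop_drop, hdrop]; rfl
      have hci : chunk[i]? = some c := by
        rw [← List.head?_drop, hdrop]; rfl
      have hlook : PySem.List.pyGet? chunk ((i : Int) + 1) = r.head? := by
        have hcast : ((i : Int) + 1) = ((i + 1 : Nat) : Int) := by push_cast; ring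
        rw [hcast, PySem.List.pyGet?_natCast, ← List.head?_drop, hdr]
      have hslice : PySem.Chars.slice chunk (some (fp : Int)) (some (i : Int)) =
          (chunk.drop fp).take (i - fp) := by
        rw [PySem.Chars.slice_eq_listSlice, PySem.List.slice_natCast]
      rw [pvGoA]
      by_cases hc : c = '.'
      · rw [if_pos hc]
        rw [ih r (i + 1) (i + 1) _ (by simp at hn; omega) hdr le_rfl]
        rw [Nat.sub_self, List.take_zero, pvGlue_nil _ (pvTok_ne_nil r)]
        rw [pvTok, if_pos hc, hslice]
        simp [pvGlue]
      · by_cases hm : c = '-' ∧ PySem.List.pyGet? chunk ((i : Int) + 1) = some '>'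
        · rw [if_neg hc, if_pos hm]
          obtain ⟨r', rfl⟩ : ∃ r', r = '>' :: r' := by
            rw [hlook] at hm
            cases r with
            | nil => simp at hm
            | cons a t =>
              simp only [List.head?_cons, Option.some.injEq] at hm
              exact ⟨t, by rw [hm.2]⟩
          rw [pvGoA, if_neg (by decide), if_neg (by simp)]
          have hdr2 : chunk.drop (i + 2) = r' := by
            rw [show i + 2 = (i + 1) + 1 by ring, ← List.drop_drop, hdr]; rfl
          rw [ih r' (i + 2) (i + 2) _ (by simp at hn; omega) hdr2 le_rfl]
          rw [Nat.sub_self, List.take_zero, pvGlue_nil _ (pvTok_ne_nil r')]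
          rw [pvTok, if_neg (by simp [hm.1]), if_pos (by simp [hm.1]), hslice]
          simp [pvGlue]
        · rw [if_neg hc, if_neg hm]
          rw [ih r fp (i + 1) comps (by simp at hn; omega) hdr (by omega)]
          have htok : pvTok (c :: r) = pvGlue [c] (pvTok r) := by
            rw [pvTok, if_neg hc, if_neg (fun hh => hm ⟨hh.1, by rw [hlook]; exact hh.2⟩)]
          have hS : (chunk.drop fp).take (i + 1 - fp) = (chunk.drop fp).take (i - fp) ++ [c] := by
            rw [show i + 1 - fp = (i - fp) + 1 by omega, List.take_add_one]
            congr
            rw [List.getElem?_drop, show fp + (i - fp) = i by omega, hci]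
            rfl
          rw [htok, pvGlue_glue, hS]

-- ===== assembling both ports =====
theorem pvParse_eq (expression : String) :
    parse_cpp_chained_expression_py expression = parse_cpp_chained_expression_py_alt expression := by
  rw [parse_cpp_chained_expression_py, parse_cpp_chained_expression_py_alt]
  simp only [PySem.List.foldl_append_singleton_eq_map, List.nil_append]
  set last := (PySem.List.pyGet? (PySem.Chars.splitOn (PySem.Chars.strip expression.toList) [':', ':']) (-1)).getD [] with hlast
  rw [pvGoA_eq last last.length last 0 0 _ le_rfl (by simp) le_rfl]
  simp only [Nat.sub_zero, List.drop_zero, List.take_zero]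
  rw [pvGlue_nil _ (pvTok_ne_nil last)]
  rw [pvReplace_arrow, pvSplitOn_single, pvSpD_rep, pvClassify_eq]

-- ===== VERDICT (by name: the statement is the Claim_ definition above) =====
theorem parse_cpp_chained_expression_py_spec : Claim_equal_parse_cpp_chained_expression_py := by
  intro expression _
  exact pvParse_eq expression
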